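-- pv_equiv track=rewrite | github.com/hemal507/python | second_duplicate.py | alternative
-- ===== SOURCE A (Python) =====
-- def alternative(a) :
--         if len(a) == len(set(a)) :
--                 return -1
--         all_repeated_elemets = set([x for x in a if a.count(x) > 1])
--         pos = []
--         for i in all_repeated_elemets :
--                 pos.append([j for j, x in enumerate(a) if x == i][1])
--         return a[min(pos)]
-- ===== SOURCE B (Python) =====
-- def alternative(a):
--     seen = set()
--     for x in a:
--         if x in seen:
--             return x
--         seen.add(x)
--     return -1
-- ===== Notes on version B (the rewrite author's own statement) =====
-- stated objective: faster
-- what changed: replaced the repeated-element set built with a.count plus a per-element second-occurrence scan by a single left-to-right pass with a seen-set that returns the first element already seen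
import Mathlib
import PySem

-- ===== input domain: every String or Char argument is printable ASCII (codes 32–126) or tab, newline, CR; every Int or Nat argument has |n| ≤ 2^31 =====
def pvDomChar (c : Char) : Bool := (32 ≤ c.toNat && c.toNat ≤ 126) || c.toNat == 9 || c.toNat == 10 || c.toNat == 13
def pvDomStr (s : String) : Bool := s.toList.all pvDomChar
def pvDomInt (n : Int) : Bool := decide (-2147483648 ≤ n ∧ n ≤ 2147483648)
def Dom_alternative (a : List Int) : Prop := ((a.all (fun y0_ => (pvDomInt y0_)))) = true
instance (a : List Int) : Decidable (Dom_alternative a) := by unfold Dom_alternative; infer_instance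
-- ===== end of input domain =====

-- B replaces A's quadratic count/second-occurrence scans with one linear pass over a seen-set; return values are proved equal.

-- ===== PORT A =====
-- literal transliteration of A; the `.getD 0` defaults stand where Python would
-- raise (IndexError on [..][1], ValueError on min([])), which is unreachable here.
def alternative (a : List Int) : Int :=
  if a.length = (PySem.Set.ofList a).length then -1
  else
    let all_repeated_elemets : PySem.Set Int :=
      PySem.Set.ofList (a.filter (fun x => decide (1 < PySem.List.count a x)))
    let pos : List Int :=
      all_repeated_elemets.foldl (fun acc i =>
        acc ++ [((((PySem.List.enumerate a 0).filter (fun q => q.2 == i)).map (fun q => q.1))[1]?).getD 0]) []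
    (PySem.List.pyGet? a ((PySem.List.min? pos (fun v => v)).getD 0)).getD 0

-- ===== PORT B =====
def altGo : List Int → PySem.Set Int → Int
  | [], _ => -1
  | x :: rest, seen =>
    if PySem.Set.contains seen x then x else altGo rest (PySem.Set.add seen x)

def alternative_alt (a : List Int) : Int := altGo a PySem.Set.empty

-- ===== PRECONDITION & SPEC =====
def Spec_alternative (a : List Int) (out : Int) : Prop := out = alternative_alt a
instance (a : List Int) (out : Int) : Decidable (Spec_alternative a out) := by unfold Spec_alternative; infer_instance

-- ===== CLAIM (what is proved, stated in full; the proofs are below) =====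
def Claim_equal_alternative : Prop := ∀ (a : List Int), Dom_alternative a → Spec_alternative a (alternative a)

-- ===== LEMMAS AND PROOFS =====

-- ofList is a sublist of its argument (via the foldl/add unfolding)
theorem pv_foldl_add_sublist (xs : List Int) : ∀ (s : PySem.Set Int),
    ∃ t, xs.foldl PySem.Set.add s = s ++ t ∧ List.Sublist t xs := by
  induction xs with
  | nil => intro s; exact ⟨[], by simp, by simp⟩
  | cons x xs ih =>
    intro s
    by_cases hc : x ∈ s
    · obtain ⟨t, ht, hs⟩ := ih s
      refine ⟨t, ?_, hs.cons _⟩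
      rw [List.foldl_cons]
      have : PySem.Set.add s x = s := by simp [PySem.Set.add, hc]
      rw [this]; exact ht
    · obtain ⟨t, ht, hs⟩ := ih (s ++ [x])
      refine ⟨x :: t, ?_, hs.cons₂ _⟩
      rw [List.foldl_cons]
      have : PySem.Set.add s x = s ++ [x] := by simp [PySem.Set.add, hc]
      rw [this, ht, List.append_assoc]; rfl

theorem pv_ofList_sublist (xs : List Int) : List.Sublist (PySem.Set.ofList xs) xs := by
  obtain ⟨t, ht, hs⟩ := pv_foldl_add_sublist xs []
  simpa [PySem.Set.ofList_eq_foldl, ht] using hs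

-- every list is nodup or splits as p ++ x :: s with p nodup and x ∈ p
theorem pv_decomp (a : List Int) :
    a.Nodup ∨ ∃ p x s, a = p ++ x :: s ∧ p.Nodup ∧ x ∈ p := by
  induction a using List.reverseRecOn with
  | nil => left; simp
  | append_singleton t y ih =>
    rcases ih with ht | ⟨p, x, s, rfl, hp, hx⟩
    · by_cases hy : y ∈ t
      · exact Or.inr ⟨t, y, [], rfl, ht, hy⟩
      · left
        rw [List.nodup_append]
        refine ⟨ht, List.nodup_singleton y, ?_⟩
        intro b hb c hc
        rw [List.mem_singleton] at hc
        subst hc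
        intro hby
        exact hy (hby ▸ hb)
    · exact Or.inr ⟨p, x, s ++ [y], by simp, hp, hx⟩

-- B returns -1 on a nodup continuation
theorem pv_altGo_nodup (t : List Int) : ∀ seen : PySem.Set Int,
    (seen ++ t).Nodup → altGo t seen = -1 := by
  induction t with
  | nil => intro seen _; rfl
  | cons x r ih =>
    intro seen h
    have hx : x ∉ seen := by
      intro hmem
      have := List.disjoint_of_nodup_append h
      exact this hmem (by simp)
    have hnd : ((seen ++ [x]) ++ r).Nodup := by simpa using h
    simp [altGo, hx, PySem.Set.add, ih _ hnd]

-- B returns x when the input splits as p ++ x :: s with seen ++ p nodup and x ∈ seen ++ p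
theorem pv_altGo_found (p : List Int) : ∀ (s : List Int) (x : Int) (seen : PySem.Set Int),
    (seen ++ p).Nodup → x ∈ seen ++ p → altGo (p ++ x :: s) seen = x := by
  induction p with
  | nil =>
    intro s x seen _ hx
    have hxs : x ∈ seen := by simpa using hx
    simp [altGo, hxs]
  | cons y p ih =>
    intro s x seen hnd hx
    have hy : y ∉ seen := by
      intro hmem
      exact List.disjoint_of_nodup_append hnd hmem (by simp)
    have hnd2 : ((seen ++ [y]) ++ p).Nodup := by simpa using hnd
    have hx2 : x ∈ (seen ++ [y]) ++ p := by simpa using hx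
    have hstep : altGo ((y :: p) ++ x :: s) seen = altGo (p ++ x :: s) (seen ++ [y]) := by
      simp [altGo, hy, PySem.Set.add]
    rw [hstep]
    exact ih s x (seen ++ [y]) hnd2 hx2

-- the index list A builds for value i has length a.count i
theorem pv_filter_enum_length (a : List Int) (st i : Int) :
    (((PySem.List.enumerate a st).filter (fun q => q.2 == i)).map (fun q => q.1)).length
      = a.count i := by
  rw [List.length_map, ← List.countP_eq_length_filter]
  have h := List.countP_map (p := (· == i)) (f := fun q : Int × Int => q.2)
    (l := PySem.List.enumerate a st)
  rw [PySem.List.map_snd_enumerate] at h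
  rw [List.count_eq_countP, h]
  rfl

-- members of the index list built from a block starting at st are ≥ st
theorem pv_mem_enum_ge (xs : List Int) (st : Int) (i v : Int)
    (hv : v ∈ ((PySem.List.enumerate xs st).filter (fun q => q.2 == i)).map (fun q => q.1)) :
    st ≤ v := by
  obtain ⟨q, hq, rfl⟩ := List.mem_map.mp hv
  have hq2 := (List.mem_filter.mp hq).1
  obtain ⟨k, hk, rfl⟩ := (PySem.List.mem_enumerate_iff xs st q).mp hq2
  simp only
  omega

-- the fold in A is a map over the repeated-element set
theorem pv_pos_eq_map (rep : PySem.Set Int) (a : List Int) :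
    rep.foldl (fun acc i =>
        acc ++ [((((PySem.List.enumerate a 0).filter (fun q => q.2 == i)).map (fun q => q.1))[1]?).getD 0]) []
      = rep.map (fun i =>
        ((((PySem.List.enumerate a 0).filter (fun q => q.2 == i)).map (fun q => q.1))[1]?).getD 0) := by
  rw [PySem.List.foldl_append_singleton_eq_map]
  exact List.nil_append _

-- with a = p ++ x :: s and p nodup: the second-occurrence index of any repeated i is ≥ p.length
theorem pv_second_idx_ge (p : List Int) (x : Int) (s : List Int) (hp : p.Nodup) (i : Int)
    (hcnt : 2 ≤ (p ++ x :: s).count i) :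
    (p.length : Int) ≤
      (((((PySem.List.enumerate (p ++ x :: s) 0).filter (fun q => q.2 == i)).map (fun q => q.1))[1]?).getD 0) := by
  set a := p ++ x :: s with ha
  have henum : PySem.List.enumerate a 0
      = PySem.List.enumerate p 0 ++ PySem.List.enumerate (x :: s) (p.length : Int) := by
    rw [ha, PySem.List.enumerate_append]; norm_num
  set I1 := ((PySem.List.enumerate p 0).filter (fun q => q.2 == i)).map (fun q => q.1) with hI1
  set I2 := ((PySem.List.enumerate (x :: s) (p.length : Int)).filter (fun q => q.2 == i)).map (fun q => q.1) with hI2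
  have hsplit : (((PySem.List.enumerate a 0).filter (fun q => q.2 == i)).map (fun q => q.1)) = I1 ++ I2 := by
    rw [henum, List.filter_append, List.map_append]
  have hlen1 : I1.length = p.count i := pv_filter_enum_length p 0 i
  have hle1 : I1.length ≤ 1 := by
    rw [hlen1]
    by_cases hi : i ∈ p
    · exact le_of_eq (List.count_eq_one_of_mem hp hi)
    · simp [List.count_eq_zero_of_not_mem hi]
  have hlen : (I1 ++ I2).length = a.count i := by
    rw [← hsplit]; exact pv_filter_enum_length a 0 i
  have hlt : 1 < (I1 ++ I2).length := by omega
  have hget : (I1 ++ I2)[1]? = some ((I1 ++ I2)[1]) := List.getElem?_eq_getElem hlt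
  rw [hsplit, hget, Option.getD_some]
  have h2 : (I1 ++ I2)[1] = I2[1 - I1.length]'(by simp at hlt ⊢; omega) :=
    List.getElem_append_right hle1
  rw [h2]
  exact pv_mem_enum_ge (x :: s) _ i _ (List.getElem_mem _)

-- with a = p ++ x :: s, p nodup, x ∈ p: the second-occurrence index of x is exactly p.length
theorem pv_second_idx_eq (p : List Int) (x : Int) (s : List Int) (hp : p.Nodup) (hx : x ∈ p) :
    (((((PySem.List.enumerate (p ++ x :: s) 0).filter (fun q => q.2 == x)).map (fun q => q.1))[1]?).getD 0)
      = (p.length : Int) := by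
  have henum : PySem.List.enumerate (p ++ x :: s) 0
      = PySem.List.enumerate p 0 ++ PySem.List.enumerate (x :: s) (p.length : Int) := by
    rw [PySem.List.enumerate_append]; norm_num
  set I1 := ((PySem.List.enumerate p 0).filter (fun q => q.2 == x)).map (fun q => q.1) with hI1
  have hlen1 : I1.length = 1 := by
    rw [hI1, pv_filter_enum_length p 0 x, List.count_eq_one_of_mem hp hx]
  obtain ⟨e, he⟩ := List.length_eq_one_iff.mp hlen1
  have henum2 : PySem.List.enumerate (x :: s) (p.length : Int)
      = ((p.length : Int), x) :: PySem.List.enumerate s ((p.length : Int) + 1) :=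
    PySem.List.enumerate_cons x s _
  rw [henum, List.filter_append, List.map_append, ← hI1, he, henum2]
  simp

-- ===== VERDICT (by name: the statement is the Claim_ definition above) =====
theorem alternative_spec : Claim_equal_alternative := by
  intro a _
  unfold Spec_alternative alternative alternative_alt
  dsimp only
  rcases pv_decomp a with hnd | ⟨p, x, s, rfl, hp, hx⟩
  · -- no duplicates: both sides are -1
    rw [PySem.Set.ofList_eq_self_of_nodup a hnd, if_pos rfl]
    exact (pv_altGo_nodup a PySem.Set.empty (by simpa using hnd)).symm
  · -- a = p ++ x :: s with p nodup, x ∈ p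
    set a := p ++ x :: s with ha
    have hnd : ¬ a.Nodup := by
      intro h
      have := List.disjoint_of_nodup_append (ha ▸ h)
      exact this hx (by simp)
    have hlen : ¬ a.length = (PySem.Set.ofList a).length := by
      intro h
      have := (pv_ofList_sublist a).eq_of_length h.symm
      exact hnd (this ▸ PySem.Set.nodup_ofList a)
    rw [if_neg hlen]
    have hcntx : 2 ≤ a.count x := by
      rw [ha, List.count_append, List.count_cons_self, List.count_eq_one_of_mem hp hx]
      omega
    rw [pv_pos_eq_map]
    set f : Int → Int := fun i =>
      ((((PySem.List.enumerate a 0).filter (fun q => q.2 == i)).map (fun q => q.1))[1]?).getD 0 with hf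
    set rep := PySem.Set.ofList (a.filter (fun y => decide (1 < PySem.List.count a y))) with hrep
    have hxrep : x ∈ rep := by
      rw [hrep, PySem.Set.mem_ofList, List.mem_filter]
      refine ⟨by simp [ha], ?_⟩
      simp only [decide_eq_true_eq, PySem.List.count]
      omega
    have hfx : f x = (p.length : Int) := by
      rw [hf]; exact pv_second_idx_eq p x s hp hx
    have hmem : (p.length : Int) ∈ rep.map f := hfx ▸ List.mem_map_of_mem hxrep
    have hlb : ∀ v ∈ rep.map f, (p.length : Int) ≤ v := by
      intro v hv
      obtain ⟨i, hi, rfl⟩ := List.mem_map.mp hv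
      have hcnt : 2 ≤ a.count i := by
        rw [hrep, PySem.Set.mem_ofList, List.mem_filter] at hi
        have := of_decide_eq_true hi.2
        simpa [PySem.List.count] using this
      exact pv_second_idx_ge p x s hp i hcnt
    obtain ⟨m, hm⟩ : ∃ m, PySem.List.min? (rep.map f) (fun v => v) = some m := by
      cases h : PySem.List.min? (rep.map f) (fun v => v) with
      | none =>
        rw [PySem.List.min?_eq_none_iff] at h
        rw [h] at hmem; cases hmem
      | some m => exact ⟨m, rfl⟩
    have hmval : m = (p.length : Int) :=
      le_antisymm (PySem.List.min?_isMin hm _ hmem) (hlb m (PySem.List.min?_mem hm))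
    rw [hm, Option.getD_some, hmval, ha, PySem.List.pyGet?_append_length, Option.getD_some]
    exact (pv_altGo_found p s x PySem.Set.empty (by simpa using hp) (by simpa using hx)).symm
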